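-- pv_equiv track=rewrite | github.com/5l1v3r1/television.py | d2-mac.py | bch_encode
-- ===== SOURCE A (Python) =====
-- def bch_encode(code, n, k):
--
--     g = 0b100001101110111
--
--     code <<= (n - k)
--     c = code
--
--     for x in range(k - 1, -1, -1):
--         if c & (1 << (x + (n - k))):
--             c ^= g << x
--
--     return code ^ c
-- ===== SOURCE B (Python) =====
-- def bch_encode(code, n, k):
--     # Serial shift-register GF(2) division as a while-countdown: keep only the
--     # running remainder register, feed one message bit per step from the right,
--     # and fold the un-shifted generator in at width n-k; A instead XORs the
--     # shifted generator g<<x into the full-width codeword at each set bit.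
--     g = 0b100001101110111
--     m = n - k
--     shifted = code << m
--     r = shifted >> k if k > 0 else shifted
--     j = k
--     while j > 0:
--         j -= 1
--         r = (r << 1) + ((shifted >> j) & 1)
--         if (r >> m) & 1:
--             r ^= g
--     return shifted ^ r
-- ===== Notes on version B (the rewrite author's own statement) =====
-- stated objective: alternative
-- what changed: A divides by XOR-ing the full-width shifted generator g<<x into the whole codeword at each bit of a range loop; B runs a serial shift-register CRC division as a while-countdown that keeps only the running remainder register, feeding one message bit in per step and folding the un-shifted generator in at width n-k.
import Mathlib
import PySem

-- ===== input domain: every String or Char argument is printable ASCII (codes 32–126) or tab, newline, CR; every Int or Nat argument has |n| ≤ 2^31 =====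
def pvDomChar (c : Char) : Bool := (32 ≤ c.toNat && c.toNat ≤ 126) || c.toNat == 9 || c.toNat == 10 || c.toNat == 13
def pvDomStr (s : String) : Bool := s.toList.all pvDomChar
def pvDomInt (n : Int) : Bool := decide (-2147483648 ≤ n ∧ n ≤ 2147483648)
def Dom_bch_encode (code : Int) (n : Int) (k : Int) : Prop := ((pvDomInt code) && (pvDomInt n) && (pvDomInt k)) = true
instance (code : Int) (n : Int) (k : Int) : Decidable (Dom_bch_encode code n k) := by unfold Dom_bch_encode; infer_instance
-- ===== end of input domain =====

-- B replaces A's full-width 'XOR g<<x into the codeword' range loop by a serial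
-- shift-register division keeping only the remainder register (objective: alternative).

-- ===== PORT A =====
def bch_encode (code : Int) (n : Int) (k : Int) : Int :=
  let g : Int := 0b100001101110111
  let code := code <<< (n - k).toNat
  let c := (PySem.List.pyRange (k - 1) (-1) (-1)).foldl
    (fun (c : Int) (x : Int) =>
      if PySem.Int.band c (1 <<< (x + (n - k)).toNat) ≠ 0 then
        PySem.Int.bxor c (g <<< x.toNat)
      else c) code
  PySem.Int.bxor code c

-- ===== PORT B =====
-- B's while-countdown loop: j counts the message bits still to be consumed.
def bchRem (g shifted : Int) (m : Nat) : Nat → Int → Int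
  | 0, r => r
  | j + 1, r =>
      let r' := (r <<< (1:Nat)) + PySem.Int.band (shifted >>> j) 1
      bchRem g shifted m j (if PySem.Int.band (r' >>> m) 1 ≠ 0 then PySem.Int.bxor r' g else r')

def bch_encode_alt (code : Int) (n : Int) (k : Int) : Int :=
  let g : Int := 0b100001101110111
  let m : Nat := (n - k).toNat
  let shifted : Int := code <<< m
  let r0 : Int := if k > 0 then shifted >>> k.toNat else shifted
  PySem.Int.bxor shifted (bchRem g shifted m k.toNat r0)

-- ===== PRECONDITION & SPEC =====
-- Pre_ excludes n < k, where Python's 'code << (n - k)' raises ValueError (negative shift count).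
def Pre_bch_encode (code : Int) (n : Int) (k : Int) : Prop := k ≤ n
instance (code : Int) (n : Int) (k : Int) : Decidable (Pre_bch_encode code n k) := by
  unfold Pre_bch_encode; infer_instance
def pvWitness_bch_encode : Int × Int × Int := (11, 15, 4)

def Spec_bch_encode (code : Int) (n : Int) (k : Int) (out : Int) : Prop := out = bch_encode_alt code n k
instance (code : Int) (n : Int) (k : Int) (out : Int) : Decidable (Spec_bch_encode code n k out) := by unfold Spec_bch_encode; infer_instance

-- ===== CLAIM (what is proved, stated in full; the proofs are below) =====
def Claim_equal_bch_encode : Prop := ∀ (code : Int) (n : Int) (k : Int), Dom_bch_encode code n k → Pre_bch_encode code n k → Spec_bch_encode code n k (bch_encode code n k)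

-- ===== LEMMAS AND PROOFS =====

-- bit i of a, as an integer (0 or 1); Python-exact on negatives (two's complement)
def ibit (a : Int) (i : Nat) : Int := (a >>> i) % 2

lemma natCast_shiftRight (X : Nat) (q : Nat) : ((X : Int) >>> q) = ((X >>> q : Nat) : Int) := by
  rw [Int.shiftRight_eq_div_pow, Nat.shiftRight_eq_div_pow]
  exact_mod_cast (Int.natCast_div X (2^q)).symm

lemma ibit_natCast (X : Nat) (i : Nat) : ibit (X : Int) i = ((X.testBit i).toNat : Int) := by
  unfold ibit
  rw [natCast_shiftRight]
  have h := Nat.testBit_eq_decide_div_mod_eq (x := X) (i := i)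
  rw [Nat.shiftRight_eq_div_pow]
  generalize hT : X / 2^i = t at *
  cases hb : X.testBit i <;> rw [hb] at h <;> simp at h ⊢ <;> omega

lemma shiftRight_neg (a : Int) (q : Nat) (_ : a < 0) :
    a >>> q = -((-a - 1) >>> q) - 1 := by
  rw [Int.shiftRight_eq_div_pow, Int.shiftRight_eq_div_pow]
  set Q : Int := ((2^q : Nat) : Int) with hQ
  have hQ0 : 0 < Q := by positivity
  set m : Int := -a - 1 with hm
  have h2 : Q * (m / Q) + m % Q = m := Int.mul_ediv_add_emod m Q
  have hr1 : 0 ≤ m % Q := Int.emod_nonneg m (by omega)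
  have hr2 : m % Q < Q := Int.emod_lt_of_pos m hQ0
  have := (Int.ediv_emod_unique (a := a) (b := Q) (r := Q - 1 - m % Q) (q := -(m / Q) - 1) hQ0).mpr
    ⟨by linarith [h2], by omega, by omega⟩
  omega

lemma ibit_negSucc (X : Nat) (i : Nat) : ibit (-(X : Int) - 1) i = 1 - ((X.testBit i).toNat : Int) := by
  unfold ibit
  rw [shiftRight_neg _ _ (by omega)]
  have h3 : -(-(X : Int) - 1) - 1 = (X : Int) := by ring
  rw [h3, natCast_shiftRight]
  have h := ibit_natCast X i
  unfold ibit at h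
  rw [natCast_shiftRight] at h
  generalize hT : (X >>> i : Nat) = t at *
  cases hb : X.testBit i <;> rw [hb] at h <;> simp at h ⊢ <;> omega

-- B's bit-feed step reconstructs the working value one bit lower.
lemma feed_step (a : Int) : ((a >>> (1:Nat)) <<< (1:Nat)) + a % 2 = a := by
  rw [Int.shiftRight_eq_div_pow, Int.shiftLeft_eq]
  have := Int.mul_ediv_add_emod a 2
  norm_num
  omega

-- every Int is a natCast or the complement of a natCast
lemma int_cases (a : Int) : (∃ X : Nat, a = (X : Int)) ∨ (∃ X : Nat, a = -(X : Int) - 1) := by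
  rcases le_or_gt 0 a with h | h
  · exact Or.inl ⟨a.toNat, by omega⟩
  · exact Or.inr ⟨(-a - 1).toNat, by omega⟩

lemma toNat_shiftLeft_cast (b : Nat) (j : Nat) : ((b : Int) <<< j) = ((b <<< j : Nat) : Int) := by
  rw [Int.shiftLeft_eq, Nat.shiftLeft_eq]
  push_cast
  ring

lemma natlem1 (x g j : Nat) : (x ^^^ (g <<< j)) >>> j = (x >>> j) ^^^ g := by
  apply Nat.eq_of_testBit_eq
  intro i
  simp [Nat.testBit_shiftRight, Nat.testBit_xor, Nat.testBit_shiftLeft]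

lemma natlem2 (x g i j : Nat) (hij : i < j) : (x ^^^ (g <<< j)).testBit i = x.testBit i := by
  simp [Nat.testBit_xor, Nat.testBit_shiftLeft, Nat.not_le.mpr hij]

lemma bxor_negSucc_natCast (X M : Nat) :
    PySem.Int.bxor (-(X:Int) - 1) (M:Int) = -((X ^^^ M : Nat) : Int) - 1 := by
  unfold PySem.Int.bxor
  rw [if_neg (by omega), if_pos (by omega)]
  norm_num

lemma band_negSucc_natCast (X M : Nat) :
    PySem.Int.band (-(X:Int) - 1) (M:Int) = ((M - (M &&& X) : Nat) : Int) := by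
  unfold PySem.Int.band
  rw [if_neg (by omega), if_pos (by omega)]
  norm_num

-- A's truthiness test 'c & (1 << p)' is the bit test.
lemma band_pow_ne_zero_iff (a : Int) (p : Nat) :
    (PySem.Int.band a (1 <<< p) ≠ 0) ↔ ibit a p = 1 := by
  simp only [Nat.one_shiftLeft]
  rcases int_cases a with ⟨X, rfl⟩ | ⟨X, rfl⟩
  · rw [PySem.Int.band_natCast, ibit_natCast, Nat.and_two_pow]
    cases hb : X.testBit p <;> simp
  · rw [band_negSucc_natCast, ibit_negSucc, Nat.and_comm, Nat.and_two_pow]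
    have hp : 0 < 2^p := Nat.two_pow_pos p
    cases hb : X.testBit p <;> simp

-- XOR of the shifted generator commutes with the register shift.
lemma bxor_shift (a b : Int) (j : Nat) (hb : 0 ≤ b) :
    (PySem.Int.bxor a (b <<< j)) >>> j = PySem.Int.bxor (a >>> j) b := by
  obtain ⟨bn, rfl⟩ : ∃ bn : Nat, b = (bn : Int) := ⟨b.toNat, by omega⟩
  rw [toNat_shiftLeft_cast]
  rcases int_cases a with ⟨X, rfl⟩ | ⟨X, rfl⟩
  · rw [PySem.Int.bxor_natCast, natCast_shiftRight, natCast_shiftRight,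
      PySem.Int.bxor_natCast, natlem1]
  · rw [bxor_negSucc_natCast, shiftRight_neg _ _ (by omega),
      shiftRight_neg (-(X:Int) - 1) _ (by omega)]
    have h1 : -(-((X ^^^ bn <<< j : Nat) : Int) - 1) - 1 = ((X ^^^ bn <<< j : Nat) : Int) := by ring
    have h2 : -(-((X : Nat) : Int) - 1) - 1 = ((X : Nat) : Int) := by ring
    rw [h1, h2, natCast_shiftRight, natCast_shiftRight]
    rw [bxor_negSucc_natCast, natlem1]

-- XOR of the shifted generator does not touch bits below j.
lemma ibit_bxor_low (a b : Int) (i j : Nat) (hb : 0 ≤ b) (hij : i < j) :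
    ibit (PySem.Int.bxor a (b <<< j)) i = ibit a i := by
  obtain ⟨bn, rfl⟩ : ∃ bn : Nat, b = (bn : Int) := ⟨b.toNat, by omega⟩
  rw [toNat_shiftLeft_cast]
  rcases int_cases a with ⟨X, rfl⟩ | ⟨X, rfl⟩
  · rw [PySem.Int.bxor_natCast, ibit_natCast, ibit_natCast, natlem2 _ _ _ _ hij]
  · rw [bxor_negSucc_natCast, ibit_negSucc, ibit_negSucc, natlem2 _ _ _ _ hij]

-- range(k-1, -1, -1) is [k-1, ..., 0]
lemma pyRange_down (k : Int) :
    PySem.List.pyRange (k - 1) (-1) (-1) = (List.range k.toNat).map (fun t : Nat => (k - 1 - (t:Int))) := by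
  unfold PySem.List.pyRange
  rw [if_neg (by omega)]
  dsimp only
  rw [if_neg (by omega)]
  rcases le_or_gt k 0 with h | h
  · rw [if_neg (by omega)]
    have : k.toNat = 0 := by omega
    simp [this]
  · rw [if_pos (by omega)]
    have h1 : (k - 1 - -1 + -(-1) - 1) / -(-1) = k := by norm_num
    rw [h1]
    refine List.map_congr_left ?_
    intro t _
    ring

lemma range_succ_map_shift (K : Nat) :
    (List.range (K+1)).map (fun t : Nat => ((K:Int) + 1 - 1 - (t:Int))) =
    ((K : Int) :: (List.range K).map (fun t : Nat => ((K : Int) - 1 - (t:Int)))) := by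
  rw [List.range_succ_eq_map, List.map_cons, List.map_map]
  congr 1
  · norm_num
  · refine List.map_congr_left ?_
    intro t _
    simp [Function.comp, Nat.succ_eq_add_one]
    ring

-- main loop invariant: B's register is A's working value shifted right by the
-- number of message bits not yet consumed.
lemma loop_eq (m : Nat) (g s : Int) (hg : 0 ≤ g) :
    ∀ (K : Nat) (c : Int), (∀ i : Nat, i < K → ibit c i = ibit s i) →
    bchRem g s m K (c >>> K)
    = ((List.range K).map (fun t : Nat => ((K : Int) - 1 - (t:Int)))).foldl
      (fun (c : Int) (x : Int) => if PySem.Int.band c (1 <<< (x.toNat + m)) ≠ 0 then PySem.Int.bxor c (g <<< x.toNat) else c) c := by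
  intro K
  induction K with
  | zero =>
    intro c _
    simp [bchRem]
  | succ K ih =>
    intro c hc
    have hcast : (fun t : Nat => (((K+1 : Nat) : Int) - 1 - (t:Int))) = (fun t : Nat => ((K:Int) + 1 - 1 - (t:Int))) := by
      funext t; push_cast; ring
    rw [hcast, range_succ_map_shift, List.foldl_cons]
    show bchRem g s m K _ = _
    have hband : PySem.Int.band (s >>> K) 1 = ibit s K := by
      rw [PySem.Int.band_one, PySem.Int.mod_eq_emod_of_pos (by omega)]; rfl
    have hr' : ((c >>> (K+1)) <<< (1:Nat)) + PySem.Int.band (s >>> K) 1 = c >>> K := by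
      rw [hband, ← hc K (by omega)]
      show ((c >>> (K+1)) <<< (1:Nat)) + (c >>> K) % 2 = c >>> K
      rw [Int.shiftRight_add]
      exact feed_step (c >>> K)
    have hcond : (PySem.Int.band ((c >>> K) >>> m) 1 ≠ 0) ↔ (PySem.Int.band c (1 <<< (K + m)) ≠ 0) := by
      rw [band_pow_ne_zero_iff, PySem.Int.band_one, PySem.Int.mod_eq_emod_of_pos (by omega)]
      show (c >>> K) >>> m % 2 ≠ 0 ↔ ibit c (K+m) = 1
      rw [← Int.shiftRight_add]
      have h2 := Int.emod_two_eq (c >>> (K + m))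
      unfold ibit
      constructor <;> intro h <;> omega
    simp only [hr']
    have htoNat : ((K : Int)).toNat = K := by omega
    simp only [htoNat]
    by_cases hA : PySem.Int.band c (1 <<< (K + m)) ≠ 0
    · rw [if_pos (hcond.mpr hA), if_pos hA]
      rw [← bxor_shift c g K hg]
      exact ih (PySem.Int.bxor c (g <<< K)) (fun i hi => by
        rw [ibit_bxor_low c g i K hg hi]; exact hc i (by omega))
    · rw [if_neg (fun h => hA (hcond.mp h)), if_neg hA]
      exact ih c (fun i hi => hc i (by omega))

-- ===== VERDICT (by name: the statement is the Claim_ definition above) =====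
theorem bch_encode_spec : Claim_equal_bch_encode := by
  intro code n k _ hpre
  have hnk : k ≤ n := hpre
  unfold Spec_bch_encode bch_encode bch_encode_alt
  dsimp only
  rw [pyRange_down]
  obtain ⟨K, hK⟩ : ∃ K : Nat, k.toNat = K := ⟨k.toNat, rfl⟩
  rw [hK]
  set g : Int := 17271 with hg'
  set m : Nat := (n - k).toNat with hm
  set s : Int := code <<< m with hs
  have hr0 : (if k > 0 then s >>> K else s) = s >>> K := by
    rcases le_or_gt k 0 with h | h
    · rw [if_neg (by omega)]
      have : K = 0 := by omega
      simp [this]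
    · rw [if_pos (by omega)]
  rw [hr0]
  -- rewrite the element-lambda: for k ≥ 0, k - 1 - t = ↑K - 1 - t; for k < 0 the list is empty
  have hlist : (List.range K).map (fun t : Nat => (k - 1 - (t:Int))) =
      (List.range K).map (fun t : Nat => ((K : Int) - 1 - (t:Int))) := by
    rcases le_or_gt 0 k with h0 | h0
    · refine List.map_congr_left ?_
      intro t _
      have : k = (K : Int) := by omega
      rw [this]
    · have : K = 0 := by omega
      simp [this]
  rw [hlist]
  -- normalize A's fold body on the members of the list
  have hA : ((List.range K).map (fun t : Nat => ((K : Int) - 1 - (t:Int)))).foldl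
      (fun (c : Int) (x : Int) =>
        if PySem.Int.band c (1 <<< (x + (n - k)).toNat) ≠ 0 then PySem.Int.bxor c (g <<< x.toNat) else c) s
    = ((List.range K).map (fun t : Nat => ((K : Int) - 1 - (t:Int)))).foldl
      (fun (c : Int) (x : Int) =>
        if PySem.Int.band c (1 <<< (x.toNat + m)) ≠ 0 then PySem.Int.bxor c (g <<< x.toNat) else c) s := by
    refine PySem.List.foldl_congr_mem _ _ _ _ ?_
    intro acc x hx
    obtain ⟨t, ht, rfl⟩ := List.mem_map.mp hx
    have ht' : t < K := List.mem_range.mp ht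
    have hx0 : 0 ≤ (K : Int) - 1 - (t:Int) := by omega
    have : (((K : Int) - 1 - (t:Int)) + (n - k)).toNat = ((K : Int) - 1 - (t:Int)).toNat + m := by
      rw [hm]; omega
    rw [this]
  rw [hA]
  have := loop_eq m g s (by norm_num [hg']) K s (fun i _ => rfl)
  rw [← this]
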